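-- pv_equiv track=rewrite | github.com/ajosan25/scapegoating-nlp | trump_analysis/nssm.py | most_negative_entity_in_corpus
-- ===== SOURCE A (Python) =====
-- def most_negative_entity_in_corpus(dict, corpus):
--     max = 0
--     max_key = ""
--     for entity in dict:
--         if(corpus.find(entity) != -1 and dict[entity] > max):
--             max = dict[entity]
--             max_key = entity
--
--     return (max, max_key)
-- ===== SOURCE B (Python) =====
-- def most_negative_entity_in_corpus(dict, corpus):
--     # value first: the best score is the max over entities present in the corpus
--     # (only positive values can beat A's starting 0), then the winning key is the
--     # first entity that attains it.
--     best = max((v for k, v in dict.items() if v > 0 and k in corpus), default=0)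
--     if best == 0:
--         return (0, "")
--     key = next(k for k, v in dict.items() if v == best and k in corpus)
--     return (best, key)
-- ===== Notes on version B (the rewrite author's own statement) =====
-- stated objective: idiomatic
-- what changed: Replaces the running (max, key) accumulator loop by a declarative two-step: max() over a generator of present positive values, then next() to pick the first key attaining that maximum.
import Mathlib
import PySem

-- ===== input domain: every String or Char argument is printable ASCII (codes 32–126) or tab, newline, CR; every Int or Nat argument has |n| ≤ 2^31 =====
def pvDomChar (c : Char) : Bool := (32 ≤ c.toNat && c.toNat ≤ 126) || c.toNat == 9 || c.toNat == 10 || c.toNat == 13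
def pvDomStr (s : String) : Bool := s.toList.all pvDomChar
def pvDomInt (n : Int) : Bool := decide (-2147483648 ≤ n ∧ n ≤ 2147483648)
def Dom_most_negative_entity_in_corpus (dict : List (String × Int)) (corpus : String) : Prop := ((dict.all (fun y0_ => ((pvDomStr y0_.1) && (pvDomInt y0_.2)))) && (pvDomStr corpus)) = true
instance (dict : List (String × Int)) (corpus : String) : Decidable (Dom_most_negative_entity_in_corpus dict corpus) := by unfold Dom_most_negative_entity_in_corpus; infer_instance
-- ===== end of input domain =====

-- B replaces A's running (max, key) accumulator loop by a declarative two-step —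
-- max() over the present positive values, then next() for the first key attaining
-- it — proved to return A's exact value on every input (objective: idiomatic).

-- ===== PORT A =====
-- A iterates over the dict's keys; dict[entity] never raises (entity is a key),
-- so d.getD entity 0 is exact there.
def most_negative_entity_in_corpus (dict : List (String × Int)) (corpus : String) : Int × String :=
  let d := PySem.Dict.ofList dict
  d.keys.foldl
    (fun (acc : Int × String) entity =>
      if PySem.Str.find corpus entity ≠ -1 ∧ acc.1 < d.getD entity 0 then
        (d.getD entity 0, entity)
      else acc)
    (0, "")

-- ===== PORT B =====
-- next(...) cannot exhaust when best ≠ 0 (proved); `.getD ""` only totalises that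
-- unreachable branch.
def most_negative_entity_in_corpus_alt (dict : List (String × Int)) (corpus : String) : Int × String :=
  let items := (PySem.Dict.ofList dict).items
  let best := PySem.List.maxD
    ((items.filter (fun p => decide (0 < p.2) && PySem.Str.isIn p.1 corpus)).map (fun p => p.2))
    (fun v => v) 0
  if best = 0 then (0, "")
  else
    (best, ((items.find? (fun p => p.2 == best && PySem.Str.isIn p.1 corpus)).map (fun p => p.1)).getD "")

-- ===== PRECONDITION & SPEC =====
def Spec_most_negative_entity_in_corpus (dict : List (String × Int)) (corpus : String) (out : Int × String) : Prop := out = most_negative_entity_in_corpus_alt dict corpus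
instance (dict : List (String × Int)) (corpus : String) (out : Int × String) : Decidable (Spec_most_negative_entity_in_corpus dict corpus out) := by unfold Spec_most_negative_entity_in_corpus; infer_instance

-- ===== CLAIM (what is proved, stated in full; the proofs are below) =====
def Claim_equal_most_negative_entity_in_corpus : Prop := ∀ (dict : List (String × Int)) (corpus : String), Dom_most_negative_entity_in_corpus dict corpus → Spec_most_negative_entity_in_corpus dict corpus (most_negative_entity_in_corpus dict corpus)

-- ===== LEMMAS AND PROOFS =====

-- A's loop body, as a step over (key, value) pairs (proof-only helper).
def pvStepA (corpus : String) (acc : Int × String) (p : String × Int) : Int × String :=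
  if PySem.Str.find corpus p.1 ≠ -1 ∧ acc.1 < p.2 then (p.2, p.1) else acc

-- the running maximum A's loop maintains in its first component
def pvRunMax (corpus : String) (l : List (String × Int)) (m : Int) : Int :=
  l.foldl (fun b p => if PySem.Str.isIn p.1 corpus = true then max b p.2 else b) m

lemma pvA_as_items (dict : List (String × Int)) (corpus : String) :
    most_negative_entity_in_corpus dict corpus =
      (PySem.Dict.ofList dict).items.foldl (pvStepA corpus) (0, "") := by
  have hk : (PySem.Dict.ofList dict).keys = (PySem.Dict.ofList dict).items.map (fun p => p.1) := rfl
  show ((PySem.Dict.ofList dict).keys).foldl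
      (fun (acc : Int × String) entity =>
        if PySem.Str.find corpus entity ≠ -1 ∧ acc.1 < (PySem.Dict.ofList dict).getD entity 0 then
          ((PySem.Dict.ofList dict).getD entity 0, entity)
        else acc) (0, "") = _
  rw [hk, List.foldl_map]
  exact PySem.List.foldl_congr_mem _ _ _ _ (fun acc p hp => by
    have hv : (PySem.Dict.ofList dict).getD p.1 0 = p.2 :=
      PySem.Dict.getD_of_mem_items _ (by simpa using hp) (PySem.Dict.nodup_keys_ofList dict) 0
    simp [pvStepA, hv])

lemma pvRunMax_filter (corpus : String) (l : List (String × Int)) (m : Int) :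
    pvRunMax corpus l m
      = ((l.filter (fun p => PySem.Str.isIn p.1 corpus)).map (fun p => p.2)).foldl max m := by
  induction l generalizing m with
  | nil => rfl
  | cons p l ih =>
    by_cases h : PySem.Chars.isIn p.1.toList corpus.toList = true
    · simpa [pvRunMax, List.foldl_cons, List.filter_cons, h] using ih (max m p.2)
    · simpa [pvRunMax, List.foldl_cons, List.filter_cons, h] using ih m

lemma pvFold_filter_pos (vs : List Int) (m : Int) (hm : 0 ≤ m) :
    vs.foldl max m = (vs.filter (fun v => decide (0 < v))).foldl max m := by
  induction vs generalizing m with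
  | nil => rfl
  | cons v vs ih =>
    by_cases h : 0 < v
    · simp only [List.foldl_cons, List.filter_cons, h, decide_true]
      exact ih _ (by omega)
    · have hm' : max m v = m := by omega
      simp only [List.foldl_cons, List.filter_cons, h, decide_false, hm']
      exact ih _ hm

lemma pvMaxD_pos (ws : List Int) (h : ∀ v ∈ ws, 0 < v) :
    ws.foldl max 0 = PySem.List.maxD ws (fun v => v) 0 := by
  cases ws with
  | nil => rfl
  | cons c t =>
    have hc : 0 < c := h c (by simp)
    simp [PySem.List.maxD, PySem.List.max?_id_cons, List.foldl_cons, max_eq_right hc.le]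

-- B's `best` equals the running maximum of A's loop from 0
lemma pvBest_eq (corpus : String) (l : List (String × Int)) :
    PySem.List.maxD
      ((l.filter (fun p => decide (0 < p.2) && PySem.Str.isIn p.1 corpus)).map (fun p => p.2))
      (fun v => v) 0 = pvRunMax corpus l 0 := by
  have h1 : ((l.filter (fun p => PySem.Str.isIn p.1 corpus)).map (fun p => p.2)).filter
        (fun v => decide (0 < v))
      = (l.filter (fun p => decide (0 < p.2) && PySem.Str.isIn p.1 corpus)).map (fun p => p.2) := by
    rw [List.filter_map, List.filter_filter]
    rfl
  have hpos : ∀ v ∈ (l.filter (fun p => decide (0 < p.2) && PySem.Str.isIn p.1 corpus)).map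
      (fun p => p.2), 0 < v := by
    intro v hv
    obtain ⟨p, hp, rfl⟩ := List.mem_map.mp hv
    have := (List.mem_filter.mp hp).2
    simp only [Bool.and_eq_true, decide_eq_true_eq] at this
    exact this.1
  rw [pvRunMax_filter, pvFold_filter_pos _ _ le_rfl, h1, pvMaxD_pos _ hpos]

-- characterisation of A's loop: either nothing beats the start, or the result is
-- the running maximum paired with the first key attaining it
lemma pvA_char (corpus : String) :
    ∀ (l : List (String × Int)) (m : Int) (k : String),
      (pvRunMax corpus l m = m ∧ l.foldl (pvStepA corpus) (m, k) = (m, k))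
      ∨ (m < pvRunMax corpus l m ∧ ∃ q,
          l.find? (fun p => p.2 == pvRunMax corpus l m && PySem.Str.isIn p.1 corpus) = some q ∧
          l.foldl (pvStepA corpus) (m, k) = (pvRunMax corpus l m, q.1)) := by
  intro l
  induction l with
  | nil => intro m k; left; exact ⟨rfl, rfl⟩
  | cons p l ih =>
    intro m k
    by_cases hin : PySem.Chars.isIn p.1.toList corpus.toList = true
    · have hf : PySem.Chars.find corpus.toList p.1.toList ≠ -1 := by
        rw [PySem.Chars.find_ne_neg_one_iff]; exact (PySem.Chars.isIn_iff_infix _ _).mp hin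
      by_cases hlt : m < p.2
      · have hstep : pvStepA corpus (m, k) p = (p.2, p.1) := by simp [pvStepA, hf, hlt]
        have hrm : pvRunMax corpus (p :: l) m = pvRunMax corpus l p.2 := by
          simp [pvRunMax, List.foldl_cons, hin, max_eq_right hlt.le]
        rcases ih p.2 p.1 with ⟨h0, hres⟩ | ⟨hpos, q, hfind, hres⟩
        · right
          refine ⟨?_, p, ?_, ?_⟩
          · rw [hrm, h0]; exact hlt
          · rw [hrm, h0]; simp [PySem.Str.isIn_eq, hin]
          · rw [hrm, h0]; simp only [List.foldl_cons, hstep, hres]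
        · right
          have hne : (p.2 == pvRunMax corpus (p :: l) m) = false := by
            rw [hrm]; simp only [beq_eq_false_iff_ne, ne_eq]; omega
          refine ⟨?_, q, ?_, ?_⟩
          · rw [hrm]; omega
          · rw [List.find?_cons_of_neg (by simp [hne])]
            rw [hrm]; exact hfind
          · rw [hrm]; simp only [List.foldl_cons, hstep, hres]
      · have hstep : pvStepA corpus (m, k) p = (m, k) := by simp [pvStepA, hlt]
        have hrm : pvRunMax corpus (p :: l) m = pvRunMax corpus l m := by
          have hmx : max m p.2 = m := by omega
          simp [pvRunMax, List.foldl_cons, hin, hmx]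
        rcases ih m k with ⟨h0, hres⟩ | ⟨hpos, q, hfind, hres⟩
        · left
          exact ⟨by rw [hrm, h0], by simp only [List.foldl_cons, hstep, hres]⟩
        · right
          have hne : (p.2 == pvRunMax corpus (p :: l) m) = false := by
            rw [hrm]; simp only [beq_eq_false_iff_ne, ne_eq]; omega
          refine ⟨by rw [hrm]; exact hpos, q, ?_, ?_⟩
          · rw [List.find?_cons_of_neg (by simp [hne])]
            rw [hrm]; exact hfind
          · rw [hrm]; simp only [List.foldl_cons, hstep, hres]
    · have hf : ¬ PySem.Chars.find corpus.toList p.1.toList ≠ -1 := by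
        rw [PySem.Chars.find_ne_neg_one_iff]
        exact fun h => hin ((PySem.Chars.isIn_iff_infix _ _).mpr h)
      have hstep : pvStepA corpus (m, k) p = (m, k) := by simp [pvStepA, hf]
      have hrm : pvRunMax corpus (p :: l) m = pvRunMax corpus l m := by
        simp [pvRunMax, List.foldl_cons, hin]
      rcases ih m k with ⟨h0, hres⟩ | ⟨hpos, q, hfind, hres⟩
      · left
        exact ⟨by rw [hrm, h0], by simp only [List.foldl_cons, hstep, hres]⟩
      · right
        refine ⟨by rw [hrm]; exact hpos, q, ?_, ?_⟩
        · rw [List.find?_cons_of_neg (by simp [PySem.Str.isIn_eq, hin])]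
          rw [hrm]; exact hfind
        · rw [hrm]; simp only [List.foldl_cons, hstep, hres]

-- ===== VERDICT (by name: the statement is the Claim_ definition above) =====
theorem most_negative_entity_in_corpus_spec : Claim_equal_most_negative_entity_in_corpus := by
  intro dict corpus _
  unfold Spec_most_negative_entity_in_corpus most_negative_entity_in_corpus_alt
  rw [pvA_as_items]
  simp only [pvBest_eq]
  rcases pvA_char corpus (PySem.Dict.ofList dict).items 0 "" with ⟨h0, hres⟩ | ⟨hpos, q, hfind, hres⟩
  · simp [hres, h0]
  · have hne : pvRunMax corpus (PySem.Dict.ofList dict).items 0 ≠ 0 := by omega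
    simp only [PySem.Str.isIn_eq] at hfind
    simp [hres, hne, hfind]
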